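-- pv_equiv track=rewrite | github.com/JaeLinJoo/Python-Team-Notes | Study/programmers/Greedy/42860.py | solution
-- ===== SOURCE A (Python) =====
-- def solution(name):
--     answer = 0
--     min_move = len(name)-1
--     next = 0
--
--     for n,s in enumerate(name):
--         answer += min(ord(s)-ord('A'), ord('Z')-ord(s)+1)
--
--         next = n+1
--         while next < len(name) and name[next] == 'A':
--             next += 1
--
--         min_move = min(min_move, n*2+len(name)-next)
--
--     answer += min_move
--
--     return answer
-- ===== SOURCE B (Python) =====
-- def solution(name):
--     L = len(name)
--     # one right-to-left pass: nxt[i] = first index >= i with name[index] != 'A', else L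
--     nxt = [L] * (L + 1)
--     for i in range(L - 1, -1, -1):
--         nxt[i] = i if name[i] != 'A' else nxt[i + 1]
--     answer = sum(min(ord(c) - 65, 91 - ord(c)) for c in name)
--     best = L - 1
--     for n in range(L):
--         best = min(best, 2 * n + L - nxt[n + 1])
--     return answer + best
-- ===== Notes on version B (the rewrite author's own statement) =====
-- stated objective: faster
-- what changed: Replaces the per-position inner while-scan over runs of 'A' with a next-non-'A' index array built in one right-to-left pass, then a single loop; the vertical cost is summed separately.
import Mathlib
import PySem

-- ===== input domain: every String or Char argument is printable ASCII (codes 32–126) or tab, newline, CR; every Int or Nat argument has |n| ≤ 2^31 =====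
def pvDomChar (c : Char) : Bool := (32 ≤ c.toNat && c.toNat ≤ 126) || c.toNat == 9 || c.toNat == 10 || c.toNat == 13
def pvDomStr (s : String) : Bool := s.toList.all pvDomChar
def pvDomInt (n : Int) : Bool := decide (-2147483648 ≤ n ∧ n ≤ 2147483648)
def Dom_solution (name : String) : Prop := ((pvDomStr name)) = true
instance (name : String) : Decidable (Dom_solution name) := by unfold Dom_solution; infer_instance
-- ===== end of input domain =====

-- B replaces A's quadratic inner while-scan with a next-non-'A' array built in one
-- right-to-left pass plus a single loop (O(n) instead of O(n^2)); return values are equal.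


-- ===== PORT A =====
-- the inner `while next < len(name) and name[next] == 'A': next += 1`,
-- expressed structurally on the remaining suffix `full.drop j`
def skipA : List Char → Nat → Nat
  | [], j => j
  | c :: rest, j => if c = 'A' then skipA rest (j + 1) else j

-- the `for n, s in enumerate(name)` loop carrying (answer, min_move)
def loopA (full : List Char) : Nat → List Char → Int × Int → Int × Int
  | _, [], st => st
  | n, s :: rest, (a, m) =>
      let a' := a + min ((s.toNat : Int) - 65) (90 - (s.toNat : Int) + 1)
      let nxt := skipA (full.drop (n + 1)) (n + 1)
      loopA full (n + 1) rest (a', min m ((n : Int) * 2 + (full.length : Int) - (nxt : Int)))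

def solution (name : String) : Int :=
  let cs := name.toList
  let st := loopA cs 0 cs (0, (cs.length : Int) - 1)
  st.1 + st.2

-- ===== PORT B =====
-- Source B's right-to-left pass filling nxt: element k is nxt[i+k], last element is L
def nxtList (L : Nat) : List Char → Nat → List Nat
  | [], _ => [L]
  | c :: rest, i =>
      let tail := nxtList L rest (i + 1)
      (if c = 'A' then tail.headD L else i) :: tail

def solution_alt (name : String) : Int :=
  let cs := name.toList
  let L := cs.length
  let nxt := nxtList L cs 0
  let answer := cs.foldl (fun a c => a + min ((c.toNat : Int) - 65) (91 - (c.toNat : Int))) 0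
  let best := (List.range L).foldl
      (fun (b : Int) (n : Nat) => min b (2 * (n : Int) + (L : Int) - (nxt.getD (n + 1) L : Int)))
      ((L : Int) - 1)
  answer + best

-- ===== PRECONDITION & SPEC =====
def Spec_solution (name : String) (out : Int) : Prop := out = solution_alt name
instance (name : String) (out : Int) : Decidable (Spec_solution name out) := by unfold Spec_solution; infer_instance

-- ===== CLAIM (what is proved, stated in full; the proofs are below) =====
def Claim_equal_solution : Prop := ∀ (name : String), Dom_solution name → Spec_solution name (solution name)

-- ===== LEMMAS AND PROOFS =====

-- sum of the per-letter vertical costs (A's form)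
def vsum : List Char → Int
  | [] => 0
  | c :: rest => min ((c.toNat : Int) - 65) (90 - (c.toNat : Int) + 1) + vsum rest

theorem foldl_vert_eq_vsum (cs : List Char) :
    ∀ a : Int, cs.foldl (fun a c => a + min ((c.toNat : Int) - 65) (91 - (c.toNat : Int))) a
      = a + vsum cs := by
  induction cs with
  | nil => intro a; simp [vsum]
  | cons c rest ih =>
      intro a
      have h : min ((c.toNat : Int) - 65) (91 - (c.toNat : Int))
          = min ((c.toNat : Int) - 65) (90 - (c.toNat : Int) + 1) := by omega
      simp only [List.foldl_cons, ih, vsum, h]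
      ring

-- A's loop splits into the vertical sum plus a min-fold over the index range
theorem loopA_split (full : List Char) (rest : List Char) :
    ∀ (n : Nat) (a m : Int),
      loopA full n rest (a, m)
        = (a + vsum rest,
           (List.range' n rest.length).foldl
             (fun (m : Int) (j : Nat) => min m ((j : Int) * 2 + (full.length : Int)
                 - (skipA (full.drop (j + 1)) (j + 1) : Int))) m) := by
  induction rest with
  | nil => intro n a m; simp [loopA, vsum]
  | cons s rest ih =>
      intro n a m
      simp only [loopA, ih, vsum, List.length_cons, List.range'_succ, List.foldl_cons,
        Prod.mk.injEq]
      exact ⟨by ring, trivial⟩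

-- correctness of the right-to-left nxt pass against A's forward scan
theorem nxtList_getD (L : Nat) :
    ∀ (cs : List Char) (i k : Nat), i + cs.length = L → k ≤ cs.length →
      (nxtList L cs i).getD k L = skipA (cs.drop k) (i + k) := by
  intro cs
  induction cs with
  | nil =>
      intro i k h hk
      have hk0 : k = 0 := Nat.le_zero.mp hk
      subst hk0
      simp only [List.length_nil, Nat.add_zero] at h
      simp [nxtList, skipA, h]
  | cons c rest ih =>
      intro i k h hk
      have hlen : i + 1 + rest.length = L := by
        simp only [List.length_cons] at h
        omega
      cases k with
      | zero =>
          have hh : (nxtList L rest (i + 1)).headD L = (nxtList L rest (i + 1)).getD 0 L := by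
            cases nxtList L rest (i + 1) <;> simp
          have hv := ih (i + 1) 0 hlen (Nat.zero_le _)
          simp only [List.drop_zero, Nat.add_zero] at hv
          simp only [nxtList, List.getD_cons_zero, List.drop_zero, skipA, hh, hv]
          simp
      | succ k' =>
          have hk' : k' ≤ rest.length := by
            simp only [List.length_cons] at hk
            omega
          have hv := ih (i + 1) k' hlen hk'
          simp only [nxtList, List.getD_cons_succ, List.drop_succ_cons, hv]
          congr 1
          omega

-- folding min over equal functions gives equal results
theorem foldl_min_congr (f g : Nat → Int) (l : List Nat) (h : ∀ j ∈ l, f j = g j) :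
    ∀ m : Int, l.foldl (fun m j => min m (f j)) m = l.foldl (fun m j => min m (g j)) m := by
  induction l with
  | nil => intro m; rfl
  | cons x xs ih =>
      intro m
      simp only [List.foldl_cons, h x (List.mem_cons_self), ih (fun j hj => h j (List.mem_cons_of_mem _ hj))]

-- ===== VERDICT (by name: the statement is the Claim_ definition above) =====
theorem solution_spec : Claim_equal_solution := by
  intro name _
  unfold Spec_solution solution solution_alt
  set cs := name.toList with hcs
  simp only [loopA_split cs cs 0, foldl_vert_eq_vsum]
  have hrange : List.range cs.length = List.range' 0 cs.length := List.range_eq_range'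
  rw [hrange]
  have hcong : ∀ j ∈ List.range' 0 cs.length,
      (2 * (j : Int) + (cs.length : Int) - ((nxtList cs.length cs 0).getD (j + 1) cs.length : Int))
        = ((j : Int) * 2 + (cs.length : Int) - (skipA (cs.drop (j + 1)) (j + 1) : Int)) := by
    intro j hj
    have hjlt : j < cs.length := by
      have := List.mem_range'_1.mp hj
      omega
    have := nxtList_getD cs.length cs 0 (j + 1) (by omega) (by omega)
    simp only [Nat.zero_add] at this
    rw [this]
    ring
  rw [foldl_min_congr _ _ _ hcong]
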